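-- pv_equiv track=rewrite | github.com/omicsNLP/MetaboliteNER | chemtok/StringTools.py | isLackingCloseBracket
-- ===== SOURCE A (Python) =====
-- def isLackingCloseBracket(s):
-- 	"""
-- 	Would adding a close bracket to the end of the string make it balanced?
-- 	E.g. "(example" would return true, whereas "example", "(example)" and "example)"
-- 	would return false.
--
-- 	Args:
-- 		s: The string to test.
--
-- 	Returns:
-- 		Whether a close bracket would balance the string.
-- 	"""
-- 	bracketLevel = 0
-- 	for c in s[::-1]: #reversing
-- 		if c in '([{':
-- 			bracketLevel -= 1
-- 		elif c in ')]}':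
-- 			bracketLevel += 1
-- 		if bracketLevel == -1:
-- 			return True
-- 	return False
-- ===== SOURCE B (Python) =====
-- def isLackingCloseBracket(s):
--     """Forward single pass: total bracket depth vs minimum prefix depth."""
--     balance = 0
--     minBalance = 0
--     for c in s:
--         if balance < minBalance:
--             minBalance = balance
--         if c in '([{':
--             balance += 1
--         elif c in ')]}':
--             balance -= 1
--     return balance > minBalance
-- ===== Notes on version B (the rewrite author's own statement) =====
-- stated objective: alternative
-- what changed: Replaces A's reverse scan with early exit at suffix level -1 by a forward single pass that tracks the total bracket depth and the minimum prefix depth and compares them once at the end.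
import Mathlib
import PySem

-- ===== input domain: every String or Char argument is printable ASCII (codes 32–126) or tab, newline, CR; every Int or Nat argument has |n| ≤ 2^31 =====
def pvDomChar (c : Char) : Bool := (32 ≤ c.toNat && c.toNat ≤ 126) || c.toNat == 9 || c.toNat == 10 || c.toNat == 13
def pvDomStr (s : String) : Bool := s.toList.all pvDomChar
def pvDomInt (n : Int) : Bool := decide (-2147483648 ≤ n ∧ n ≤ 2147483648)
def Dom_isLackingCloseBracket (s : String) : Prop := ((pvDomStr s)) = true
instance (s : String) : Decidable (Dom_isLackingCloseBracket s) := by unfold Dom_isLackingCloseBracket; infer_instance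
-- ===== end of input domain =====

-- B replaces A's reverse scan (early exit on suffix level -1) with a forward pass tracking
-- total bracket depth and minimum prefix depth, compared once at the end (alternative decomposition).

-- ===== PORT A =====
-- loop 'for c in s[::-1]' with early return; s[::-1] is exact reversal (PySem.Str.slice?_none_none_neg_one)
def goA : List Char → Int → Bool
  | [], _ => false
  | c :: rest, bracketLevel =>
    let lvl := if c = '(' ∨ c = '[' ∨ c = '{' then bracketLevel - 1
               else if c = ')' ∨ c = ']' ∨ c = '}' then bracketLevel + 1
               else bracketLevel
    if lvl = -1 then true else goA rest lvl

def isLackingCloseBracket (s : String) : Bool := goA s.toList.reverse 0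

-- ===== PORT B =====
-- forward loop over s with state (balance, minBalance); minBalance is updated before balance
def goB : List Char → Int → Int → Int × Int
  | [], balance, minBalance => (balance, minBalance)
  | c :: rest, balance, minBalance =>
    let m := if balance < minBalance then balance else minBalance
    let b := if c = '(' ∨ c = '[' ∨ c = '{' then balance + 1
             else if c = ')' ∨ c = ']' ∨ c = '}' then balance - 1
             else balance
    goB rest b m

def isLackingCloseBracket_alt (s : String) : Bool :=
  let p := goB s.toList 0 0
  decide (p.2 < p.1)

-- ===== PRECONDITION & SPEC =====
def Spec_isLackingCloseBracket (s : String) (out : Bool) : Prop := out = isLackingCloseBracket_alt s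
instance (s : String) (out : Bool) : Decidable (Spec_isLackingCloseBracket s out) := by unfold Spec_isLackingCloseBracket; infer_instance

-- ===== CLAIM (what is proved, stated in full; the proofs are below) =====
def Claim_equal_isLackingCloseBracket : Prop := ∀ (s : String), Dom_isLackingCloseBracket s → Spec_isLackingCloseBracket s (isLackingCloseBracket s)

-- ===== LEMMAS AND PROOFS =====

/-- per-character depth change: +1 for an open bracket, -1 for a close bracket, 0 otherwise -/
def delta (c : Char) : Int :=
  if c = '(' ∨ c = '[' ∨ c = '{' then 1
  else if c = ')' ∨ c = ']' ∨ c = '}' then -1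
  else 0

/-- total depth of a character list -/
def dep (l : List Char) : Int := (l.map delta).sum

theorem dep_nil : dep [] = 0 := rfl

theorem dep_cons (c : Char) (l : List Char) : dep (c :: l) = delta c + dep l := by
  simp [dep]

theorem dep_reverse (l : List Char) : dep l.reverse = dep l := by
  simp [dep, List.sum_reverse]

theorem delta_le_one (c : Char) : delta c ≤ 1 := by
  unfold delta; split_ifs <;> omega

/-- A's loop hits level -1 iff some prefix has depth exceeding the start level (needs 0 ≤ lvl). -/
theorem goA_char (l : List Char) : ∀ lvl : Int, 0 ≤ lvl →
    (goA l lvl = true ↔ ∃ q, q <+: l ∧ lvl < dep q) := by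
  induction l with
  | nil =>
    intro lvl h
    simp only [goA]
    constructor
    · intro h'; cases h'
    · rintro ⟨q, hq, hd⟩
      rw [List.prefix_nil] at hq; subst hq
      simp [dep_nil] at hd; omega
  | cons c rest ih =>
    intro lvl h
    have hl : (if c = '(' ∨ c = '[' ∨ c = '{' then lvl - 1
               else if c = ')' ∨ c = ']' ∨ c = '}' then lvl + 1
               else lvl) = lvl - delta c := by
      unfold delta; split_ifs <;> ring
    simp only [goA, hl]
    by_cases hm : lvl - delta c = -1
    · rw [if_pos hm]
      refine iff_of_true rfl ⟨[c], ⟨rest, rfl⟩, ?_⟩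
      simp only [dep_cons, dep_nil]
      omega
    · have hge : 0 ≤ lvl - delta c := by have := delta_le_one c; omega
      rw [if_neg hm, ih (lvl - delta c) hge]
      constructor
      · rintro ⟨q, hq, hd⟩
        exact ⟨c :: q, List.cons_prefix_cons.mpr ⟨rfl, hq⟩, by rw [dep_cons]; omega⟩
      · rintro ⟨q, hq, hd⟩
        cases q with
        | nil => simp [dep_nil] at hd; omega
        | cons c' q' =>
          obtain ⟨hc, hq'⟩ := List.cons_prefix_cons.mp hq
          subst hc
          rw [dep_cons] at hd
          exact ⟨q', hq', by omega⟩

theorem goB_fst (l : List Char) : ∀ b m : Int, (goB l b m).1 = b + dep l := by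
  induction l with
  | nil => intro b m; simp [goB, dep_nil]
  | cons c rest ih =>
    intro b m
    have hb : (if c = '(' ∨ c = '[' ∨ c = '{' then b + 1
               else if c = ')' ∨ c = ']' ∨ c = '}' then b - 1
               else b) = b + delta c := by
      unfold delta; split_ifs <;> ring
    simp only [goB, hb, ih, dep_cons]; ring

/-- values of minBalance's candidates: the running balance before each character -/
def prefVals : List Char → Int → List Int
  | [], _ => []
  | c :: rest, b => b :: prefVals rest (b + delta c)

theorem goB_snd (l : List Char) : ∀ b m : Int,
    (goB l b m).2 = List.foldl min m (prefVals l b) := by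
  induction l with
  | nil => intro b m; simp [goB, prefVals]
  | cons c rest ih =>
    intro b m
    have hb : (if c = '(' ∨ c = '[' ∨ c = '{' then b + 1
               else if c = ')' ∨ c = ']' ∨ c = '}' then b - 1
               else b) = b + delta c := by
      unfold delta; split_ifs <;> ring
    have hm : (if b < m then b else m) = min m b := by
      rw [min_comm, min_def]; split_ifs <;> omega
    simp only [goB, hb, hm, ih, prefVals, List.foldl_cons]

theorem mem_prefVals (l : List Char) : ∀ (b x : Int),
    x ∈ prefVals l b ↔ ∃ t, t <:+ l ∧ t ≠ [] ∧ x = b + dep l - dep t := by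
  induction l with
  | nil =>
    intro b x
    simp only [prefVals, List.not_mem_nil, false_iff]
    rintro ⟨t, ht, hne, _⟩
    exact hne (List.suffix_nil.mp ht)
  | cons c rest ih =>
    intro b x
    simp only [prefVals, List.mem_cons, ih]
    constructor
    · rintro (rfl | ⟨t, ht, hne, rfl⟩)
      · exact ⟨c :: rest, List.suffix_refl _, by simp, by simp⟩
      · exact ⟨t, ht.trans (List.suffix_cons c rest), hne, by rw [dep_cons]; ring⟩
    · rintro ⟨t, ht, hne, rfl⟩
      rcases List.suffix_cons_iff.mp ht with rfl | ht'
      · left; ring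
      · right; exact ⟨t, ht', hne, by rw [dep_cons]; ring⟩

theorem foldl_min_lt_iff (xs : List Int) : ∀ (m b : Int),
    List.foldl min m xs < b ↔ m < b ∨ ∃ x ∈ xs, x < b := by
  induction xs with
  | nil => intro m b; simp
  | cons x xs ih =>
    intro m b
    simp only [List.foldl_cons, ih, min_lt_iff, List.mem_cons]
    constructor
    · rintro ((h | h) | ⟨y, hy, h⟩)
      · exact Or.inl h
      · exact Or.inr ⟨x, Or.inl rfl, h⟩
      · exact Or.inr ⟨y, Or.inr hy, h⟩
    · rintro (h | ⟨y, (rfl | hy), h⟩)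
      · exact Or.inl (Or.inl h)
      · exact Or.inl (Or.inr h)
      · exact Or.inr ⟨y, hy, h⟩

/-- both sides are the proposition "some suffix has positive depth" -/
theorem key (l : List Char) :
    (goA l.reverse 0 = true) ↔ ((goB l 0 0).2 < (goB l 0 0).1) := by
  rw [goA_char l.reverse 0 le_rfl, goB_fst, goB_snd, zero_add, foldl_min_lt_iff]
  constructor
  · rintro ⟨q, hq, hd⟩
    have ht : q.reverse <:+ l := by
      have h2 : q.reverse <:+ l.reverse.reverse := List.reverse_suffix.mpr hq
      simpa using h2
    have hdq : 0 < dep q.reverse := by rw [dep_reverse]; exact hd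
    have hne : q ≠ [] := by rintro rfl; simp [dep_nil] at hd
    right
    refine ⟨0 + dep l - dep q.reverse, ?_, by omega⟩
    rw [mem_prefVals]
    exact ⟨q.reverse, ht, by simpa using hne, rfl⟩
  · rintro (h | ⟨x, hx, hlt⟩)
    · -- total depth positive: the whole reversed string is a witness prefix
      exact ⟨l.reverse, List.prefix_refl _, by rw [dep_reverse]; omega⟩
    · rw [mem_prefVals] at hx
      obtain ⟨t, ht, hne, rfl⟩ := hx
      have hd : 0 < dep t := by omega
      refine ⟨t.reverse, ?_, by rw [dep_reverse]; omega⟩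
      exact List.reverse_prefix.mpr ht

-- ===== VERDICT (by name: the statement is the Claim_ definition above) =====
theorem isLackingCloseBracket_spec : Claim_equal_isLackingCloseBracket := by
  intro s _
  unfold Spec_isLackingCloseBracket isLackingCloseBracket isLackingCloseBracket_alt
  have h := key s.toList
  by_cases hA : goA s.toList.reverse 0 = true
  · rw [hA]; exact (decide_eq_true (h.mp hA)).symm
  · rw [Bool.not_eq_true] at hA
    rw [hA]
    exact (decide_eq_false (fun hc => by rw [h.mpr hc] at hA; cases hA)).symm
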